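-- pv_equiv track=rewrite | github.com/jacksondm33/legiocluster | modules/local/templates/make_mst.py | weighted_mst
-- ===== SOURCE A (Python) =====
-- def weighted_mst(lo_concat_pairwise_diffs, MST):
--     """
--     Add the weights to the MST. The MST is a dict of key:list items, which is
--       less ideal for plotting and lacks the number of mutation events or SNPs
--       (aka INT). This function converts the dict into a list of tuples and
--       adds back the number of mutation events or SNPs.
--     param: list lo_concat_pairwise_diffs = [(G1, G2, INT), (G2, G1, INT), ...]
--            where G1 and G2 are isolate names and INT the number of mutation
--            events or SNPs
--     param: dict MST = dictionary of the form G1:[G2, G3] for the MST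
--     return: list lo_weighted_MST = a list of tuples [(G1, G2, INT),...] to
--                                    draw the MST
--     """
--
--     lo_MST = []
--     lo_weighted_MST = []
--
--     # turn the dict G1:[G2,G3] into a list [(G1,G2), (G1:G3),...]
--     for key in MST.keys():
--         lo_vals = MST.get(key)
--         for val in lo_vals:
--             lo_MST.append((key, val))
--
--     # use the list to select those triplet tuples (G1, G2, (V1))
--     # that belong to the MST
--     for nodes in lo_MST:
--         for tupel in lo_concat_pairwise_diffs:
--             if nodes[0] == tupel[0] and nodes[1] == tupel[1]:
--                 lo_weighted_MST.append(tupel)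
--
--     # returns an MST with the weight (V1) added
--     return lo_weighted_MST
-- ===== SOURCE B (Python) =====
-- def weighted_mst(lo_concat_pairwise_diffs, MST):
--     # Index the pairwise diffs by (G1, G2) once, then look up each MST edge.
--     keyed = [((t[0], t[1]), t) for t in lo_concat_pairwise_diffs]
--     index = {}
--     for key, t in keyed:
--         index[key] = index.get(key, []) + [t]
--     lo_weighted_MST = []
--     for key, lo_vals in MST.items():
--         for val in lo_vals:
--             lo_weighted_MST.extend(index.get((key, val), []))
--     return lo_weighted_MST
-- ===== Notes on version B (the rewrite author's own statement) =====
-- stated objective: faster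
-- what changed: B builds a dict indexing the pairwise-diff tuples by their (G1, G2) key in one pass and then does a single O(1) lookup per MST edge, instead of A's rescanning the whole diff list for every edge.
import Mathlib
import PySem

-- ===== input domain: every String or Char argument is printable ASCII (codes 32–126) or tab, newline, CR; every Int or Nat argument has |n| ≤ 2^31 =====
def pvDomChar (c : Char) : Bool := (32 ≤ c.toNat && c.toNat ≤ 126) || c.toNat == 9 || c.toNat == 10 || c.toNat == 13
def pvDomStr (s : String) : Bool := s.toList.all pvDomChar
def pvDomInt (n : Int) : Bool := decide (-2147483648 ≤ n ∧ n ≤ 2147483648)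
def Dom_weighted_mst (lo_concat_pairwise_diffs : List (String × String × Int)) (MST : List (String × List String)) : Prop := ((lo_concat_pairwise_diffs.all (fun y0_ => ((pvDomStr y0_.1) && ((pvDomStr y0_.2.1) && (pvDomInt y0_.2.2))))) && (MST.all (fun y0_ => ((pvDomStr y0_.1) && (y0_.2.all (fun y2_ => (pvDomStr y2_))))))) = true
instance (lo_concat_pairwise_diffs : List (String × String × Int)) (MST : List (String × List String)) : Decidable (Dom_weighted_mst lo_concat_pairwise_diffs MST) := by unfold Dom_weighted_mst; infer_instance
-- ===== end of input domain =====

-- B replaces A's per-edge scan of all pairwise diffs by a dict keyed by (G1, G2) built once, then one lookup per MST edge.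

-- ===== PORT A =====
-- The MST parameter is a Python dict, represented as an association list; both ports
-- rebuild the dict (Dict.ofList) and then use its keys/get resp. items as their Python does.
def weighted_mst (lo_concat_pairwise_diffs : List (String × String × Int)) (MST : List (String × List String)) : List (String × String × Int) :=
  let d := PySem.Dict.ofList MST
  -- for key in MST.keys(): lo_vals = MST.get(key); for val in lo_vals: lo_MST.append((key, val))
  let lo_MST : List (String × String) :=
    d.keys.foldl (fun acc key =>
      (d.getD key []).foldl (fun a val => a ++ [(key, val)]) acc) []
  -- for nodes in lo_MST: for tupel in lo_concat_pairwise_diffs: if match: append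
  lo_MST.foldl (fun acc nodes =>
    lo_concat_pairwise_diffs.foldl (fun a tupel =>
      if nodes.1 == tupel.1 && nodes.2 == tupel.2.1 then a ++ [tupel] else a) acc) []

-- ===== PORT B =====
def weighted_mst_alt (lo_concat_pairwise_diffs : List (String × String × Int)) (MST : List (String × List String)) : List (String × String × Int) :=
  let keyed := lo_concat_pairwise_diffs.map (fun t => ((t.1, t.2.1), t))
  let index := keyed.foldl (fun d p => d.modify p.1 [] (· ++ [p.2])) PySem.Dict.empty
  let d := PySem.Dict.ofList MST
  d.items.foldl (fun out kv =>
    kv.2.foldl (fun o val => o ++ index.getD (kv.1, val) []) out) []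

-- ===== PRECONDITION & SPEC =====
def Spec_weighted_mst (lo_concat_pairwise_diffs : List (String × String × Int)) (MST : List (String × List String)) (out : List (String × String × Int)) : Prop := out = weighted_mst_alt lo_concat_pairwise_diffs MST
instance (lo_concat_pairwise_diffs : List (String × String × Int)) (MST : List (String × List String)) (out : List (String × String × Int)) : Decidable (Spec_weighted_mst lo_concat_pairwise_diffs MST out) := by unfold Spec_weighted_mst; infer_instance

-- ===== CLAIM (what is proved, stated in full; the proofs are below) =====
def Claim_equal_weighted_mst : Prop := ∀ (lo_concat_pairwise_diffs : List (String × String × Int)) (MST : List (String × List String)), Dom_weighted_mst lo_concat_pairwise_diffs MST → Spec_weighted_mst lo_concat_pairwise_diffs MST (weighted_mst lo_concat_pairwise_diffs MST)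

-- ===== LEMMAS AND PROOFS =====

-- the diffs matching a given edge (key, val), as A's inner scan filters them
def pvSel (diffs : List (String × String × Int)) (key val : String) : List (String × String × Int) :=
  diffs.filter (fun t => key == t.1 && val == t.2.1)

-- B's index lookup returns exactly A's filtered selection
lemma index_getD_eq (diffs : List (String × String × Int)) (key val : String) :
    ((diffs.map (fun t => ((t.1, t.2.1), t))).foldl
        (fun d p => d.modify p.1 [] (· ++ [p.2])) PySem.Dict.empty).getD (key, val) []
      = pvSel diffs key val := by
  rw [PySem.Dict.getD_foldl_modify_append]
  simp only [PySem.Dict.getD_empty, List.nil_append, List.filter_map, Function.comp_def, List.map_map]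
  simp only [pvSel]
  have h1 : ∀ t : String × String × Int,
      ((t.1, t.2.1) == (key, val)) = (key == t.1 && val == t.2.1) := by
    intro t; rw [Bool.eq_iff_iff]; simp [Prod.ext_iff]
    constructor <;> intro h <;> exact ⟨h.1.symm, h.2.symm⟩
  simp [h1]

-- B's nested fold over the dict items, with the lookups already replaced by pvSel, as one flatMap
lemma nested_eq (diffs : List (String × String × Int)) (items : List (String × List String))
    (init : List (String × String × Int)) :
    items.foldl (fun out kv =>
        kv.2.foldl (fun o val => o ++ pvSel diffs kv.1 val) out) init
      = init ++ items.flatMap (fun kv => kv.2.flatMap (fun val => pvSel diffs kv.1 val)) := by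
  induction items generalizing init with
  | nil => simp
  | cons kv rest ih =>
      simp only [List.foldl_cons, List.flatMap_cons, ih]
      rw [PySem.List.foldl_append_eq_flatMap]
      simp

-- ===== VERDICT (by name: the statement is the Claim_ definition above) =====
theorem weighted_mst_spec : Claim_equal_weighted_mst := by
  intro diffs MST _
  unfold Spec_weighted_mst weighted_mst weighted_mst_alt
  simp only [index_getD_eq, nested_eq, List.nil_append]
  rw [PySem.Dict.items_eq_map_keys _ (PySem.Dict.nodup_keys_ofList MST) []]
  simp only [List.flatMap_map]
  simp only [PySem.List.foldl_append_if, PySem.List.foldl_append_singleton_eq_map,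
    PySem.List.foldl_append_eq_flatMap, List.nil_append]
  simp [List.flatMap_assoc, List.flatMap_map, pvSel]
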